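-- pv_equiv track=rewrite | github.com/akikuno/TSUMUGI-dev | src/TSUMUGI/ontology_handler.py | find_all_descendant_terms
-- ===== SOURCE A (Python) =====
-- def find_all_descendant_terms(term_id: str, child_term_map: dict[str, set[str]]) -> set[str]:
--     """Find all descendant terms for a given term."""
--     descendant_terms = set()
--     terms_to_process = [term_id]
--
--     while terms_to_process:
--         current_term = terms_to_process.pop(0)
--         if current_term in child_term_map:
--             for child_term in child_term_map[current_term]:
--                 if child_term not in descendant_terms:
--                     descendant_terms.add(child_term)
--                     terms_to_process.append(child_term)
--
--     return descendant_terms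
-- ===== SOURCE B (Python) =====
-- def find_all_descendant_terms(term_id: str, child_term_map: dict[str, set[str]]) -> set[str]:
--     """Find all descendant terms (pure tail-recursive accumulation in discovery order)."""
--     def collect(found, pending):
--         if not pending:
--             return found
--         head, rest = pending[0], pending[1:]
--         fresh = [c for c in child_term_map.get(head, ()) if c not in found]
--         return collect(found + fresh, rest + fresh)
--     return set(collect([], [term_id]))
-- ===== Notes on version B (the rewrite author's own statement) =====
-- stated objective: alternative
-- what changed: Replaced the imperative while-loop with pop(0) and per-element mutation of a set by a pure tail-recursive helper over immutable list accumulators: each call filters the head term's still-unseen children as one comprehension batch, concatenates it onto both accumulators, and the result set is built once at the end.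
-- outside the precondition, e.g. on find_all_descendant_terms('a', {'a': ['b', 'b']}): A returns {'b'}, B returns {'b'}
import Mathlib
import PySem

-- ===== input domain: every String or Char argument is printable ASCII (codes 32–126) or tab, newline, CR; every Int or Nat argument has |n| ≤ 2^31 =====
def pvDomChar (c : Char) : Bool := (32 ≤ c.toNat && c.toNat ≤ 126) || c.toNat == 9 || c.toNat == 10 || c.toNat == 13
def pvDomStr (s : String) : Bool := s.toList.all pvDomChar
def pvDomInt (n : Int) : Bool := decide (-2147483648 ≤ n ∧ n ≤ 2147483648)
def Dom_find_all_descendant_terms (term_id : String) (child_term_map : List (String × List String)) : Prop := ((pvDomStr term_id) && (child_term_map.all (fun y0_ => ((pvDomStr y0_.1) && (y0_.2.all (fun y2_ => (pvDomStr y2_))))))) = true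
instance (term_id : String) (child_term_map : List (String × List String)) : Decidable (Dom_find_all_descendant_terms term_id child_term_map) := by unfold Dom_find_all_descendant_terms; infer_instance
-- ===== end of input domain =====

-- B replaces A's imperative pop(0)-queue/mutating-set loop by a pure tail-recursive helper
-- that adds each term's unseen children as one filtered batch; same result set.
-- The measure machinery up to pvDecC is cited by the ports' decreasing_by and therefore stays above the ports.

def pvVals (m : List (String × List String)) : List String := (m.map Prod.snd).flatten

def pvMu (m : List (String × List String)) (desc : List String) : Nat :=
  ((pvVals m).filter (fun c => !(desc.contains c))).length

-- one child visit (A's inner two lines): if child not in descendants, add it and append it to the queue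
def pvAddChild (s : PySem.Set String × List String) (c : String) : PySem.Set String × List String :=
  if PySem.Set.contains s.1 c then s else (PySem.Set.add s.1 c, s.2 ++ [c])

-- the fresh children A's child scan discovers
def pvNew (cs : List String) (d : List String) : List String :=
  (cs.foldl pvAddChild (d, [])).2

-- A's child scan adds exactly the fresh children pvNew cs d and appends the same list to the queue
theorem pvNew_spec (cs : List String) :
    ∀ (d q : List String),
      cs.foldl pvAddChild (d, q) = (d ++ pvNew cs d, q ++ pvNew cs d)
      ∧ ∀ x ∈ pvNew cs d, x ∈ cs ∧ x ∉ d := by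
  induction cs with
  | nil => intro d q; simp [pvNew]
  | cons c cs ih =>
    intro d q
    by_cases hmem : c ∈ d
    · have hct : PySem.Set.contains d c = true := by
        simp [PySem.Set.contains, List.contains_eq_mem, hmem]
      have h1 : pvAddChild (d, q) c = (d, q) := by
        simp only [pvAddChild]; rw [if_pos hct]
      have h2 : pvAddChild (d, []) c = (d, []) := by
        simp only [pvAddChild]; rw [if_pos hct]
      have hNew : pvNew (c :: cs) d = pvNew cs d := by
        simp only [pvNew, List.foldl_cons, h2]
      refine ⟨?_, ?_⟩
      · rw [hNew]; simpa [List.foldl_cons, h1] using (ih d q).1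
      · rw [hNew]
        intro x hx
        exact ⟨List.mem_cons_of_mem _ ((ih d q).2 x hx).1, ((ih d q).2 x hx).2⟩
    · have hct : PySem.Set.contains d c = false := by
        simp [PySem.Set.contains, List.contains_eq_mem, hmem]
      have hctn : ¬ (PySem.Set.contains d c = true) := by rw [hct]; simp
      have hadd : PySem.Set.add d c = d ++ [c] := by
        simp only [PySem.Set.add]
        rw [if_neg hctn]
      have h1 : pvAddChild (d, q) c = (d ++ [c], q ++ [c]) := by
        simp only [pvAddChild]; rw [if_neg hctn, hadd]
      have h2 : pvAddChild (d, []) c = (d ++ [c], [c]) := by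
        simp only [pvAddChild]; rw [if_neg hctn, hadd]; simp
      have hNew : pvNew (c :: cs) d = c :: pvNew cs (d ++ [c]) := by
        simp only [pvNew, List.foldl_cons, h2]
        have := (ih (d ++ [c]) [c]).1
        rw [this]
        exact rfl
      refine ⟨?_, ?_⟩
      · simp only [List.foldl_cons, h1, hNew]
        rw [(ih (d ++ [c]) (q ++ [c])).1]
        simp [List.append_assoc]
      · rw [hNew]
        intro x hx
        rcases List.mem_cons.mp hx with rfl | hx'
        · exact ⟨List.mem_cons_self, hmem⟩
        · have := (ih (d ++ [c]) [c]).2 x hx'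
          refine ⟨List.mem_cons_of_mem _ this.1, fun hxd => this.2 (by simp [hxd])⟩

theorem pvFilter_len_lt {α : Type} (p q : α → Bool) (h : ∀ x, q x = true → p x = true) :
    ∀ (xs : List α) (c : α), c ∈ xs → p c = true → q c = false →
      (xs.filter q).length < (xs.filter p).length := by
  intro xs
  induction xs with
  | nil => intro c hc _ _; cases hc
  | cons y ys ih =>
    intro c hc hp hq
    have hmono : (ys.filter q).length ≤ (ys.filter p).length :=
      (List.monotone_filter_right ys (by intro a ha; exact h a ha)).length_le
    rcases List.mem_cons.mp hc with rfl | hc'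
    · simp [hp, hq]
      omega
    · have := ih c hc' hp hq
      by_cases hqy : q y = true
      · simp [hqy, h y hqy]; omega
      · by_cases hpy : p y = true
        · simp [hqy, hpy]; omega
        · simp [hqy, hpy]; omega

theorem pvMu_lt (m : List (String × List String)) (d n : List String) (c : String)
    (hc : c ∈ n) (hv : c ∈ pvVals m) (hd : c ∉ d) : pvMu m (d ++ n) < pvMu m d := by
  unfold pvMu
  refine pvFilter_len_lt (fun x => !(d.contains x)) (fun x => !((d ++ n).contains x))
    ?_ (pvVals m) c hv ?_ ?_
  · intro a ha
    simp only [List.contains_eq_mem, Bool.not_eq_eq_eq_not, Bool.not_true,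
      decide_eq_false_iff_not] at ha ⊢
    intro hmem
    exact ha (List.mem_append.mpr (Or.inl hmem))
  · simp [List.contains_eq_mem, hd]
  · simp [List.contains_eq_mem, List.mem_append, hc]

theorem pvGet?_sub (m : List (String × List String)) (t : String) (cs : List String)
    (h : PySem.Dict.get? (PySem.Dict.mk m) t = some cs) : ∀ x ∈ cs, x ∈ pvVals m := by
  intro x hx
  unfold PySem.Dict.get? at h
  rcases Option.map_eq_some_iff.mp h with ⟨p, hp, hsnd⟩
  have hpm : p ∈ m := List.mem_of_find?_eq_some hp
  subst hsnd
  unfold pvVals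
  exact List.mem_flatten.mpr ⟨p.2, List.mem_map.mpr ⟨p, hpm, rfl⟩, hx⟩

theorem pvGetD_sub (m : List (String × List String)) (t : String) :
    ∀ x ∈ PySem.Dict.getD (PySem.Dict.mk m) t [], x ∈ pvVals m := by
  intro x hx
  rcases hg : PySem.Dict.get? (PySem.Dict.mk m) t with _ | cs
  · simp [PySem.Dict.getD, hg] at hx
  · exact pvGet?_sub m t cs hg x (by simpa [PySem.Dict.getD, hg] using hx)

-- termination lemma for A's queue loop
theorem pvDecA (m : List (String × List String)) (d rest : List String) (t : String)
    (cs : List String) (h : PySem.Dict.get? (PySem.Dict.mk m) t = some cs) :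
    pvMu m (cs.foldl pvAddChild (d, rest)).1 < pvMu m d
    ∨ (pvMu m (cs.foldl pvAddChild (d, rest)).1 = pvMu m d
        ∧ (cs.foldl pvAddChild (d, rest)).2.length < (t :: rest).length) := by
  obtain ⟨heq, hprop⟩ := pvNew_spec cs d rest
  rcases hn : pvNew cs d with _ | ⟨c, n'⟩
  · right
    rw [heq, hn]
    simp
  · left
    rw [heq]
    have hc : c ∈ pvNew cs d := by rw [hn]; exact List.mem_cons_self
    obtain ⟨hcs, hcd⟩ := hprop c hc
    exact pvMu_lt m d _ c hc (pvGet?_sub m t cs h c hcs) hcd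

-- termination lemma for B's recursion
theorem pvDecC (m : List (String × List String)) (found rest : List String) (t : String) :
    pvMu m (found ++ (PySem.Dict.getD (PySem.Dict.mk m) t []).filter (fun c => !(found.contains c))) < pvMu m found
    ∨ (pvMu m (found ++ (PySem.Dict.getD (PySem.Dict.mk m) t []).filter (fun c => !(found.contains c))) = pvMu m found
        ∧ (rest ++ (PySem.Dict.getD (PySem.Dict.mk m) t []).filter (fun c => !(found.contains c))).length < (t :: rest).length) := by
  by_cases hfe : (PySem.Dict.getD (PySem.Dict.mk m) t []).filter (fun c => !(found.contains c)) = []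
  · right
    rw [hfe]
    simp
  · left
    obtain ⟨c, hc⟩ := List.exists_mem_of_ne_nil _ hfe
    obtain ⟨hcs, hcd⟩ := List.mem_filter.mp hc
    refine pvMu_lt m found _ c hc (pvGetD_sub m t c hcs) ?_
    simp only [List.contains_eq_mem, Bool.not_eq_eq_eq_not, Bool.not_true,
      decide_eq_false_iff_not] at hcd
    exact hcd

-- ===== PORT A =====
def find_aux (m : List (String × List String)) (desc : PySem.Set String) (queue : List String) :
    List String :=
  match queue with
  | [] => desc
  | current :: rest =>
    match h : PySem.Dict.get? (PySem.Dict.mk m) current with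
    | none => find_aux m desc rest
    | some children =>
      let st := children.foldl pvAddChild (desc, rest)
      find_aux m st.1 st.2
termination_by (pvMu m desc, queue.length)
decreasing_by
  · exact Prod.Lex.right _ (by simp)
  · rcases pvDecA m desc rest current children h with hlt | ⟨heq, hlen⟩
    · exact Prod.Lex.left _ _ hlt
    · rw [heq]; exact Prod.Lex.right _ hlen

def find_all_descendant_terms (term_id : String) (child_term_map : List (String × List String)) :
    List String :=
  find_aux child_term_map PySem.Set.empty [term_id]

-- ===== PORT B =====
-- the inner recursive helper 'collect' of Source B: pure accumulators (found, pending)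
def collect (m : List (String × List String)) (found : List String) (pending : List String) :
    List String :=
  match pending with
  | [] => found
  | head :: rest =>
    let fresh := (PySem.Dict.getD (PySem.Dict.mk m) head []).filter (fun c => !(found.contains c))
    collect m (found ++ fresh) (rest ++ fresh)
termination_by (pvMu m found, pending.length)
decreasing_by
  rcases pvDecC m found rest head with hlt | ⟨heq, hlen⟩
  · exact Prod.Lex.left _ _ hlt
  · rw [heq]; exact Prod.Lex.right _ hlen

def find_all_descendant_terms_alt (term_id : String)
    (child_term_map : List (String × List String)) : List String :=
  PySem.Set.ofList (collect child_term_map [] [term_id])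

-- ===== PRECONDITION & SPEC =====
-- Pre_ only requires each value list of child_term_map to be duplicate-free: values have
-- Python type set[str], so every actual Python input is a valid (distinct-element) encoding
-- and is admitted; no input representable in Python is excluded.
def Pre_find_all_descendant_terms (term_id : String) (child_term_map : List (String × List String)) : Prop :=
  ∀ p ∈ child_term_map, p.2.Nodup
instance (term_id : String) (child_term_map : List (String × List String)) : Decidable (Pre_find_all_descendant_terms term_id child_term_map) := by unfold Pre_find_all_descendant_terms; infer_instance

def pvWitness_find_all_descendant_terms : String × (List (String × List String)) :=
  ("a", [("a", ["b", "c"]), ("b", ["c", "d"])])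

def Spec_find_all_descendant_terms (term_id : String) (child_term_map : List (String × List String)) (out : List String) : Prop := out = find_all_descendant_terms_alt term_id child_term_map
instance (term_id : String) (child_term_map : List (String × List String)) (out : List String) : Decidable (Spec_find_all_descendant_terms term_id child_term_map out) := by unfold Spec_find_all_descendant_terms; infer_instance

-- ===== CLAIM (what is proved, stated in full; the proofs are below) =====
def Claim_equal_find_all_descendant_terms : Prop := ∀ (term_id : String) (child_term_map : List (String × List String)), Dom_find_all_descendant_terms term_id child_term_map → Pre_find_all_descendant_terms term_id child_term_map → Spec_find_all_descendant_terms term_id child_term_map (find_all_descendant_terms term_id child_term_map)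

-- ===== LEMMAS AND PROOFS =====

theorem pvGet?_nodup (m : List (String × List String))
    (hPre : ∀ p ∈ m, p.2.Nodup) (t : String) (cs : List String)
    (h : PySem.Dict.get? (PySem.Dict.mk m) t = some cs) : cs.Nodup := by
  unfold PySem.Dict.get? at h
  rcases Option.map_eq_some_iff.mp h with ⟨p, hp, hsnd⟩
  subst hsnd
  exact hPre p (List.mem_of_find?_eq_some hp)

theorem pvGetD_nodup (m : List (String × List String))
    (hPre : ∀ p ∈ m, p.2.Nodup) (t : String) :
    (PySem.Dict.getD (PySem.Dict.mk m) t []).Nodup := by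
  rcases hg : PySem.Dict.get? (PySem.Dict.mk m) t with _ | cs
  · simp [PySem.Dict.getD, hg]
  · have : PySem.Dict.getD (PySem.Dict.mk m) t [] = cs := by simp [PySem.Dict.getD, hg]
    rw [this]; exact pvGet?_nodup m hPre t cs hg

-- A's sequential child scan discovers exactly the batch filter when children are distinct
theorem pvNew_congr (cs : List String) :
    ∀ (d₁ d₂ : List String), (∀ x ∈ cs, (x ∈ d₁ ↔ x ∈ d₂)) → pvNew cs d₁ = pvNew cs d₂ := by
  induction cs with
  | nil => intro d₁ d₂ _; rfl
  | cons c cs ih =>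
    intro d₁ d₂ hiff
    have hc := hiff c List.mem_cons_self
    by_cases hmem : c ∈ d₁
    · have hmem₂ : c ∈ d₂ := hc.mp hmem
      have h₁ : pvAddChild (d₁, []) c = (d₁, []) := by
        simp only [pvAddChild]
        rw [if_pos (by simp [PySem.Set.contains, List.contains_eq_mem, hmem])]
      have h₂ : pvAddChild (d₂, []) c = (d₂, []) := by
        simp only [pvAddChild]
        rw [if_pos (by simp [PySem.Set.contains, List.contains_eq_mem, hmem₂])]
      simp only [pvNew, List.foldl_cons, h₁, h₂]
      exact ih d₁ d₂ (fun x hx => hiff x (List.mem_cons_of_mem _ hx))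
    · have hmem₂ : c ∉ d₂ := fun h => hmem (hc.mpr h)
      have h₁ : pvAddChild (d₁, []) c = (d₁ ++ [c], [c]) := by
        simp only [pvAddChild, PySem.Set.add]
        rw [if_neg (by simp [PySem.Set.contains, List.contains_eq_mem, hmem]),
            if_neg (by simp [PySem.Set.contains, List.contains_eq_mem, hmem])]
        simp
      have h₂ : pvAddChild (d₂, []) c = (d₂ ++ [c], [c]) := by
        simp only [pvAddChild, PySem.Set.add]
        rw [if_neg (by simp [PySem.Set.contains, List.contains_eq_mem, hmem₂]),
            if_neg (by simp [PySem.Set.contains, List.contains_eq_mem, hmem₂])]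
        simp
      simp only [pvNew, List.foldl_cons, h₁, h₂]
      have e₁ := (pvNew_spec cs (d₁ ++ [c]) [c]).1
      have e₂ := (pvNew_spec cs (d₂ ++ [c]) [c]).1
      rw [show (cs.foldl pvAddChild (d₁ ++ [c], [c])).2 = [c] ++ pvNew cs (d₁ ++ [c]) by rw [e₁],
          show (cs.foldl pvAddChild (d₂ ++ [c], [c])).2 = [c] ++ pvNew cs (d₂ ++ [c]) by rw [e₂]]
      have : pvNew cs (d₁ ++ [c]) = pvNew cs (d₂ ++ [c]) := by
        refine ih _ _ (fun x hx => ?_)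
        simp only [List.mem_append, List.mem_singleton]
        exact or_congr (hiff x (List.mem_cons_of_mem _ hx)) Iff.rfl
      rw [this]

theorem pvNew_eq_filter (cs : List String) (hnd : cs.Nodup) :
    ∀ (d : List String), pvNew cs d = cs.filter (fun c => !(d.contains c)) := by
  induction cs with
  | nil => intro d; rfl
  | cons c cs ih =>
    intro d
    have hnd' : cs.Nodup := hnd.of_cons
    have hcnot : c ∉ cs := (List.nodup_cons.mp hnd).1
    by_cases hmem : c ∈ d
    · have h₁ : pvAddChild (d, []) c = (d, []) := by
        simp only [pvAddChild]
        rw [if_pos (by simp [PySem.Set.contains, List.contains_eq_mem, hmem])]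
      have hNew : pvNew (c :: cs) d = pvNew cs d := by
        simp only [pvNew, List.foldl_cons, h₁]
      rw [hNew, ih hnd' d]
      simp [List.contains_eq_mem, hmem]
    · have h₁ : pvAddChild (d, []) c = (d ++ [c], [c]) := by
        simp only [pvAddChild, PySem.Set.add]
        rw [if_neg (by simp [PySem.Set.contains, List.contains_eq_mem, hmem]),
            if_neg (by simp [PySem.Set.contains, List.contains_eq_mem, hmem])]
        simp
      have e₁ := (pvNew_spec cs (d ++ [c]) [c]).1
      have hNew : pvNew (c :: cs) d = c :: pvNew cs (d ++ [c]) := by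
        simp only [pvNew, List.foldl_cons, h₁]
        rw [show (cs.foldl pvAddChild (d ++ [c], [c])).2 = [c] ++ pvNew cs (d ++ [c]) by rw [e₁]]
        rfl
    -- for x ∈ cs (x ≠ c by nodup), membership in d ++ [c] agrees with membership in d
      have hcongr : pvNew cs (d ++ [c]) = pvNew cs d := by
        refine pvNew_congr cs _ _ (fun x hx => ?_)
        have hxc : x ≠ c := fun h => hcnot (h ▸ hx)
        simp [List.mem_append, hxc]
      rw [hNew, hcongr, ih hnd' d]
      simp [List.contains_eq_mem, hmem]

-- A's queue loop and B's recursion compute the same list, state by state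
theorem pvAuxEq (m : List (String × List String)) (hPre : ∀ p ∈ m, p.2.Nodup)
    (d q : List String) : find_aux m d q = collect m d q := by
  rcases q with _ | ⟨t, rest⟩
  · rw [find_aux, collect]
  · rcases hg : PySem.Dict.get? (PySem.Dict.mk m) t with _ | cs
    · have hgd : PySem.Dict.getD (PySem.Dict.mk m) t [] = [] := by
        simp [PySem.Dict.getD, hg]
      rw [find_aux]
      rw [collect]
      simp only [hgd, List.filter_nil, List.append_nil]
      split
      · exact pvAuxEq m hPre d rest
      · next cs heq => rw [hg] at heq; cases heq
    · have hgd : PySem.Dict.getD (PySem.Dict.mk m) t [] = cs := by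
        simp [PySem.Dict.getD, hg]
      have hfresh : (PySem.Dict.getD (PySem.Dict.mk m) t []).filter (fun c => !(d.contains c))
          = pvNew cs d := by
        rw [hgd, pvNew_eq_filter cs (pvGet?_nodup m hPre t cs hg) d]
      rw [find_aux]
      rw [collect]
      simp only [hfresh]
      split
      · next heq => rw [hg] at heq; cases heq
      · next cs' heq =>
        rw [hg] at heq
        cases heq
        rw [(pvNew_spec cs d rest).1]
        exact pvAuxEq m hPre (d ++ pvNew cs d) (rest ++ pvNew cs d)
termination_by (pvMu m d, q.length)
decreasing_by
  · exact Prod.Lex.right _ (by simp)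
  · rcases hn : pvNew cs d with _ | ⟨c, n'⟩
    · simp only [List.append_nil]
      exact Prod.Lex.right _ (by simp)
    · refine Prod.Lex.left _ _ ?_
      have hc : c ∈ pvNew cs d := by rw [hn]; exact List.mem_cons_self
      obtain ⟨hcs, hcd⟩ := (pvNew_spec cs d rest).2 c hc
      exact pvMu_lt m d (c :: n') c List.mem_cons_self (pvGet?_sub m t cs hg c hcs) hcd

-- B's result list has no duplicates, so set() leaves it unchanged
theorem pvFoldlAdd_fresh (xs : List String) :
    ∀ (s : List String), (∀ x ∈ xs, x ∉ s) → xs.Nodup →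
      xs.foldl PySem.Set.add s = s ++ xs := by
  induction xs with
  | nil => intro s _ _; simp
  | cons x xs ih =>
    intro s hfr hnd
    have hxs : x ∉ s := hfr x List.mem_cons_self
    have hadd : PySem.Set.add s x = s ++ [x] := by
      simp only [PySem.Set.add]
      rw [if_neg (by simp [PySem.Set.contains, List.contains_eq_mem, hxs])]
    rw [List.foldl_cons, hadd, ih (s ++ [x]) ?_ hnd.of_cons]
    · simp
    · intro y hy
      simp only [List.mem_append, List.mem_singleton]
      rintro (h | rfl)
      · exact hfr y (List.mem_cons_of_mem _ hy) h
      · exact (List.nodup_cons.mp hnd).1 hy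

theorem pvOfList_nodup (xs : List String) (hnd : xs.Nodup) : PySem.Set.ofList xs = xs := by
  rw [PySem.Set.ofList_eq_foldl]
  simpa using pvFoldlAdd_fresh xs [] (by simp) hnd

theorem pvCollect_nodup (m : List (String × List String)) (hPre : ∀ p ∈ m, p.2.Nodup)
    (d q : List String) (hd : d.Nodup) : (collect m d q).Nodup := by
  rcases q with _ | ⟨t, rest⟩
  · rw [collect]; exact hd
  · rw [collect]
    refine pvCollect_nodup m hPre _ _ ?_
    refine List.Nodup.append hd ((pvGetD_nodup m hPre t).filter _) ?_
    intro a ha hb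
    have := (List.mem_filter.mp hb).2
    simp only [List.contains_eq_mem, Bool.not_eq_eq_eq_not, Bool.not_true,
      decide_eq_false_iff_not] at this
    exact this ha
termination_by (pvMu m d, q.length)
decreasing_by
  rcases pvDecC m d rest t with hlt | ⟨heq, hlen⟩
  · exact Prod.Lex.left _ _ hlt
  · rw [heq]; exact Prod.Lex.right _ hlen

-- ===== VERDICT (by name: the statement is the Claim_ definition above) =====
theorem find_all_descendant_terms_spec : Claim_equal_find_all_descendant_terms := by
  intro term_id m _ hPre
  unfold Spec_find_all_descendant_terms find_all_descendant_terms find_all_descendant_terms_alt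
  rw [pvOfList_nodup _ (pvCollect_nodup m hPre [] [term_id] List.nodup_nil)]
  exact pvAuxEq m hPre PySem.Set.empty [term_id]
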